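-- pv_equiv track=rewrite | github.com/MrBrantCode/unitest_baseline | mut_generate/mist_train_cf/cf_995/solution.py | calculate_total_days
-- ===== SOURCE A (Python) =====
-- def calculate_total_days(start_year, end_year):
--     if start_year > end_year:
--         start_year, end_year = end_year, start_year
--
--     total_days = 0
--     for year in range(start_year, end_year + 1):
--         if (year % 4 == 0 and year % 100 != 0) or (year % 400 == 0):
--             total_days += 366
--         else:
--             total_days += 365
--
--     return total_days
-- ===== SOURCE B (Python) =====
-- def calculate_total_days(start_year, end_year):
--     lo, hi = min(start_year, end_year), max(start_year, end_year)
--     def leaps(y):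
--         return y // 4 - y // 100 + y // 400
--     return 365 * (hi - lo + 1) + leaps(hi) - leaps(lo - 1)
-- ===== Notes on version B (the rewrite author's own statement) =====
-- stated objective: faster
-- what changed: Replaced the per-year loop with a closed form: 365 per year plus a leap-year count obtained by floor-division inclusion-exclusion (multiples of 4 minus 100 plus 400) evaluated as a prefix-count difference.
import Mathlib
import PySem

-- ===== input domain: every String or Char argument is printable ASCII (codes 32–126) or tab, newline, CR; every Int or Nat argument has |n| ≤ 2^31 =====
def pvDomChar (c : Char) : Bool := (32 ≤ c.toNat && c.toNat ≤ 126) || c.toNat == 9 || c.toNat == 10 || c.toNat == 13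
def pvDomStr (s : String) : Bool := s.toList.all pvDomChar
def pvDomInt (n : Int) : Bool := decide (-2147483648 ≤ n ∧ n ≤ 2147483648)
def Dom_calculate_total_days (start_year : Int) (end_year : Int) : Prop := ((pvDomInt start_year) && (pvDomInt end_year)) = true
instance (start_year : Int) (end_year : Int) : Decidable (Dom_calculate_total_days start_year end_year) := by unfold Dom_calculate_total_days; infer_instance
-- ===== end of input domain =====

-- B replaces A's per-year loop with a closed form (365 per year + a leap count by
-- floor-division inclusion-exclusion), turning O(n) into O(1).

-- ===== PORT A =====
def calculate_total_days (start_year : Int) (end_year : Int) : Int :=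
  let p := if start_year > end_year then (end_year, start_year) else (start_year, end_year)
  (PySem.List.pyRange p.1 (p.2 + 1) 1).foldl
    (fun total_days year =>
      if (PySem.Int.mod year 4 = 0 ∧ PySem.Int.mod year 100 ≠ 0) ∨ PySem.Int.mod year 400 = 0
      then total_days + 366
      else total_days + 365) 0

-- ===== PORT B =====
def pvLeaps (y : Int) : Int :=
  PySem.Int.floordiv y 4 - PySem.Int.floordiv y 100 + PySem.Int.floordiv y 400

def calculate_total_days_alt (start_year : Int) (end_year : Int) : Int :=
  let lo := min start_year end_year
  let hi := max start_year end_year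
  365 * (hi - lo + 1) + pvLeaps hi - pvLeaps (lo - 1)

-- ===== PRECONDITION & SPEC =====
def Spec_calculate_total_days (start_year : Int) (end_year : Int) (out : Int) : Prop := out = calculate_total_days_alt start_year end_year
instance (start_year : Int) (end_year : Int) (out : Int) : Decidable (Spec_calculate_total_days start_year end_year out) := by unfold Spec_calculate_total_days; infer_instance

-- ===== CLAIM (what is proved, stated in full; the proofs are below) =====
def Claim_equal_calculate_total_days : Prop := ∀ (start_year : Int) (end_year : Int), Dom_calculate_total_days start_year end_year → Spec_calculate_total_days start_year end_year (calculate_total_days start_year end_year)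

-- ===== LEMMAS AND PROOFS =====

-- the loop body of A
def pvBody (total_days year : Int) : Int :=
  if (PySem.Int.mod year 4 = 0 ∧ PySem.Int.mod year 100 ≠ 0) ∨ PySem.Int.mod year 400 = 0
  then total_days + 366
  else total_days + 365

lemma pvBody_eq (acc b : Int) : pvBody acc b = acc + 365 + (pvLeaps b - pvLeaps (b - 1)) := by
  simp only [pvBody, pvLeaps,
    PySem.Int.mod_eq_emod_of_pos (show (0:Int) < 4 by norm_num),
    PySem.Int.mod_eq_emod_of_pos (show (0:Int) < 100 by norm_num),
    PySem.Int.mod_eq_emod_of_pos (show (0:Int) < 400 by norm_num),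
    PySem.Int.floordiv_eq_ediv_of_pos (show (0:Int) < 4 by norm_num),
    PySem.Int.floordiv_eq_ediv_of_pos (show (0:Int) < 100 by norm_num),
    PySem.Int.floordiv_eq_ediv_of_pos (show (0:Int) < 400 by norm_num)]
  split_ifs with h <;> omega

lemma pvLoop_closed (n : Nat) : ∀ a b : Int, b + 1 - a = (n : Int) →
    (PySem.List.pyRange a (b + 1) 1).foldl pvBody 0
      = 365 * (b + 1 - a) + pvLeaps b - pvLeaps (a - 1) := by
  induction n with
  | zero =>
      intro a b h
      have ha : a = b + 1 := by omega
      rw [PySem.List.pyRange_one_eq_nil (by omega)]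
      simp [ha]
  | succ n ih =>
      intro a b h
      have hab : a ≤ b := by omega
      rw [PySem.List.pyRange_one_succ_right hab, List.foldl_append]
      have hb : (b - 1) + 1 = b := by ring
      have := ih a (b - 1) (by omega)
      rw [hb] at this
      simp only [List.foldl_cons, List.foldl_nil, this, pvBody_eq]
      ring

-- ===== VERDICT (by name: the statement is the Claim_ definition above) =====
theorem calculate_total_days_spec : Claim_equal_calculate_total_days := by
  intro s e _
  show calculate_total_days s e = calculate_total_days_alt s e
  simp only [calculate_total_days, calculate_total_days_alt]
  rw [show (fun total_days year => if (PySem.Int.mod year 4 = 0 ∧ PySem.Int.mod year 100 ≠ 0) ∨ PySem.Int.mod year 400 = 0 then total_days + 366 else total_days + 365) = pvBody from rfl]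
  by_cases hgt : s > e
  · rw [if_pos hgt]
    rw [pvLoop_closed (s + 1 - e).toNat e s (by omega)]
    rw [max_eq_left (le_of_lt hgt), min_eq_right (le_of_lt hgt)]
    ring
  · rw [if_neg hgt]
    rw [pvLoop_closed (e + 1 - s).toNat s e (by omega)]
    rw [max_eq_right (by omega : s ≤ e), min_eq_left (by omega : s ≤ e)]
    ring
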